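-- pv_equiv track=rewrite | github.com/abkunal/Data-Structures-and-Algorithms | python/NP/set_cover.py | set_cover_solver
-- ===== SOURCE A (Python) =====
-- def set_cover_solver(X, subsets, count):
--     if len(X) == 0:
--         return count
--     else:
--         s = subsets.pop()
--         count += 1
--
--         for key in s:
--             if key in X:
--                 X.remove(key)
--
--         return set_cover_solver(X, subsets, count)
-- ===== SOURCE B (Python) =====
-- # B: counter-based — builds a multiset counter of X once, then pops subsets off the end
-- # decrementing counts until nothing remains, returning count + number of subsets used.
-- # B pops subsets exactly as A does, but does not mutate X (A empties it in place);
-- # the equivalence claimed is about the return value only.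
-- def set_cover_solver(X, subsets, count):
--     need = {}
--     for v in X:
--         need[v] = need.get(v, 0) + 1
--     remaining = len(X)
--     k = 0
--     while remaining != 0:
--         s = subsets.pop()
--         k += 1
--         for v in s:
--             if need.get(v, 0) > 0:
--                 need[v] -= 1
--                 remaining -= 1
--     return count + k
-- ===== Notes on version B (the rewrite author's own statement) =====
-- stated objective: alternative
-- what changed: Replaces A's recursive removal of elements from the list X (membership test plus linear-scan remove per key) by a multiset counter (dict) over X built once and decremented while popping subsets, returning count plus the number of subsets popped; X itself is not mutated (A empties it in place, the claim is about the return value).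
import Mathlib
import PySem

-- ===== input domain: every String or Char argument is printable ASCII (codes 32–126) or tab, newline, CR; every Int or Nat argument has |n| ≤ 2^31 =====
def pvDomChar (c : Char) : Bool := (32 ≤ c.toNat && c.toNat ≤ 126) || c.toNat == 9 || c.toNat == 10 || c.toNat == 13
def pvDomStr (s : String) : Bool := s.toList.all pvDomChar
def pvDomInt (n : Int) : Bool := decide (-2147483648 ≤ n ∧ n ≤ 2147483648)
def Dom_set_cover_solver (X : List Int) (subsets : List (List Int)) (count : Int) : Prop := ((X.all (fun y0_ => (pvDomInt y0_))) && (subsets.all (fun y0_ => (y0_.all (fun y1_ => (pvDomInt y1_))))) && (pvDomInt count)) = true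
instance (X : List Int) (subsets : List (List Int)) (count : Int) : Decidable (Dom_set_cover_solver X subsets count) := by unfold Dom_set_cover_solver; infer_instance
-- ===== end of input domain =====

-- B replaces A's recursive removal from the list X (a linear scan per key) by a multiset
-- counter built once and decremented while popping subsets, as A does (objective: alternative
-- decomposition; A also empties X in place while B leaves it — the claim is about the return value).

-- ===== PORT A =====
-- for key in s: if key in X: X.remove(key)
def scsRemove (s X : List Int) : List Int :=
  s.foldl (fun acc key => if key ∈ acc then (PySem.List.remove? acc key).getD acc else acc) X

def set_cover_solver (X : List Int) (subsets : List (List Int)) (count : Int) : Int :=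
  if X.length = 0 then count
  else
    match h : PySem.List.pop? subsets with
    | none => count   -- Python raises IndexError here; excluded by Pre_
    | some (s, rest) => set_cover_solver (scsRemove s X) rest (count + 1)
termination_by subsets.length
decreasing_by
  have := PySem.List.length_of_pop?_eq_some subsets h
  simp at this
  omega

-- ===== PORT B =====
-- one element of a subset: decrement the counter if anything of it is left to remove
def scsDec (st : PySem.Dict Int Int × Int) (v : Int) : PySem.Dict Int Int × Int :=
  if st.1.getD v 0 > 0 then (st.1.insert v (st.1.getD v 0 - 1), st.2 - 1) else st

-- while remaining != 0: s = subsets.pop(); k += 1; for v in s: …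
def scsLoop (need : PySem.Dict Int Int) (remaining : Int) (k : Int)
    (subsets : List (List Int)) : Int :=
  if remaining = 0 then k
  else
    match h : PySem.List.pop? subsets with
    | none => k   -- Python raises IndexError here; excluded by Pre_
    | some (s, rest) =>
        let st := s.foldl scsDec (need, remaining)
        scsLoop st.1 st.2 (k + 1) rest
termination_by subsets.length
decreasing_by
  have := PySem.List.length_of_pop?_eq_some subsets h
  simp at this
  omega

def set_cover_solver_alt (X : List Int) (subsets : List (List Int)) (count : Int) : Int :=
  let need := X.foldl (fun d v => d.insert v (d.getD v 0 + 1)) PySem.Dict.empty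
  count + scsLoop need (X.length : Int) 0 subsets

-- ===== PRECONDITION & SPEC =====
-- Pre_ excludes exactly the inputs on which A raises IndexError (the subsets run out while
-- X is still nonempty): every element of X must occur, with multiplicity, in the subsets.
def Pre_set_cover_solver (X : List Int) (subsets : List (List Int)) (count : Int) : Prop :=
  ∀ v ∈ X, X.count v ≤ (subsets.map (fun s => s.count v)).sum
instance (X : List Int) (subsets : List (List Int)) (count : Int) : Decidable (Pre_set_cover_solver X subsets count) := by unfold Pre_set_cover_solver; infer_instance

def pvWitness_set_cover_solver : List Int × List (List Int) × Int := ([1, 2, 2], [[2, 3], [1, 2]], 0)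

def Spec_set_cover_solver (X : List Int) (subsets : List (List Int)) (count : Int) (out : Int) : Prop := out = set_cover_solver_alt X subsets count
instance (X : List Int) (subsets : List (List Int)) (count : Int) (out : Int) : Decidable (Spec_set_cover_solver X subsets count out) := by unfold Spec_set_cover_solver; infer_instance

-- ===== CLAIM (what is proved, stated in full; the proofs are below) =====
def Claim_equal_set_cover_solver : Prop := ∀ (X : List Int) (subsets : List (List Int)) (count : Int), Dom_set_cover_solver X subsets count → Pre_set_cover_solver X subsets count → Spec_set_cover_solver X subsets count (set_cover_solver X subsets count)

-- ===== LEMMAS AND PROOFS =====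

-- counter invariant tying B's dict to A's list
def scsRel (need : PySem.Dict Int Int) (X : List Int) : Prop :=
  ∀ v : Int, need.getD v 0 = (X.count v : Int)

lemma scsRel_counter (X : List Int) :
    scsRel (X.foldl (fun d v => d.insert v (d.getD v 0 + 1)) PySem.Dict.empty) X := by
  intro v
  rw [PySem.Dict.getD_foldl_insert_add_one, PySem.Dict.getD_empty]
  simp

-- A's one-key step, explicitly
lemma scsRemove_cons (k : Int) (t X : List Int) :
    scsRemove (k :: t) X = scsRemove t (if k ∈ X then X.erase k else X) := by
  unfold scsRemove
  simp only [List.foldl_cons]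
  split_ifs with h
  · rw [PySem.List.remove?_eq_some_erase X k h]; rfl
  · rfl

-- count after A's full inner loop over a subset
lemma count_scsRemove (s : List Int) : ∀ (X : List Int) (v : Int),
    (scsRemove s X).count v = X.count v - min (s.count v) (X.count v) := by
  induction s with
  | nil => intro X v; simp [scsRemove]
  | cons k t ih =>
    intro X v
    rw [scsRemove_cons, ih]
    by_cases hk : k ∈ X
    · simp only [if_pos hk]
      by_cases hv : v = k
      · subst hv
        rw [List.count_erase_self]
        have h1 : 0 < X.count v := List.count_pos_iff.mpr hk
        simp only [List.count_cons_self]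
        omega
      · rw [List.count_erase_of_ne hv, List.count_cons_of_ne (fun h => hv h.symm)]
    · simp only [if_neg hk]
      by_cases hv : v = k
      · subst hv
        have h0 : X.count v = 0 := by
          by_contra h; exact hk (List.count_pos_iff.mp (Nat.pos_of_ne_zero h))
        simp only [List.count_cons_self]
        omega
      · rw [List.count_cons_of_ne (fun h => hv h.symm)]

-- B's inner fold matches A's inner loop under the invariant
lemma scsDec_foldl_inv (s : List Int) : ∀ (X : List Int) (need : PySem.Dict Int Int),
    scsRel need X →
    scsRel (s.foldl scsDec (need, (X.length : Int))).1 (scsRemove s X) ∧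
    (s.foldl scsDec (need, (X.length : Int))).2 = ((scsRemove s X).length : Int) := by
  induction s with
  | nil => intro X need hrel; exact ⟨hrel, rfl⟩
  | cons v t ih =>
    intro X need hrel
    rw [scsRemove_cons]
    simp only [List.foldl_cons]
    by_cases hv : v ∈ X
    · have hc : need.getD v 0 > 0 := by
        rw [hrel v]; exact_mod_cast List.count_pos_iff.mpr hv
      have hstep : scsDec (need, (X.length : Int)) v =
          (need.insert v (need.getD v 0 - 1), (X.length : Int) - 1) := by
        unfold scsDec; rw [if_pos hc]
      rw [hstep, if_pos hv]
      have hlen : ((X.length : Int) - 1) = (((X.erase v).length : Int)) := by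
        have := List.length_erase_of_mem hv
        have hpos : 0 < X.length := List.length_pos_of_mem hv
        omega
      have hrel' : scsRel (need.insert v (need.getD v 0 - 1)) (X.erase v) := by
        intro w
        rw [PySem.Dict.getD_insert]
        by_cases hw : w = v
        · subst hw
          rw [if_pos rfl, hrel w, List.count_erase_self]
          have : 0 < X.count w := List.count_pos_iff.mpr hv
          omega
        · rw [if_neg hw, hrel w, List.count_erase_of_ne hw]
      rw [hlen]
      exact ih (X.erase v) _ hrel'
    · have hc : ¬ need.getD v 0 > 0 := by
        rw [hrel v]
        have : X.count v = 0 := by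
          by_contra h; exact hv (List.count_pos_iff.mp (Nat.pos_of_ne_zero h))
        simp [this]
      have hstep : scsDec (need, (X.length : Int)) v = (need, (X.length : Int)) := by
        unfold scsDec; rw [if_neg hc]
      rw [hstep, if_neg hv]
      exact ih X need hrel

-- B's loop carries k as a pure offset
lemma scsLoop_shift (subsets : List (List Int)) : ∀ (need : PySem.Dict Int Int) (r k : Int),
    scsLoop need r k subsets = k + scsLoop need r 0 subsets := by
  induction subsets using List.reverseRecOn with
  | nil =>
    intro need r k
    rw [scsLoop, scsLoop]
    by_cases h : r = 0
    · rw [if_pos h, if_pos h]; ring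
    · rw [if_neg h, if_neg h]
      simp [PySem.List.pop?, PySem.List.pyIdx?]
  | append_singleton rest s ih =>
    intro need r k
    rw [scsLoop, scsLoop]
    by_cases h : r = 0
    · rw [if_pos h, if_pos h]; ring
    · rw [if_neg h, if_neg h, PySem.List.pop?_last rest s]
      simp only
      rw [ih _ _ (k + 1), ih _ _ (0 + 1)]
      ring

-- Pre_ is preserved by A's inner loop when one subset is consumed
lemma pre_preserved (X : List Int) (s : List Int) (rest : List (List Int)) (count : Int)
    (hpre : Pre_set_cover_solver X (rest ++ [s]) count) (count' : Int) :
    Pre_set_cover_solver (scsRemove s X) rest count' := by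
  intro v hv
  have hvX : v ∈ X := by
    have h1 : 0 < (scsRemove s X).count v := List.count_pos_iff.mpr hv
    rw [count_scsRemove] at h1
    exact List.count_pos_iff.mp (by omega)
  have h2 := hpre v hvX
  rw [List.map_append, List.sum_append] at h2
  simp only [List.map_cons, List.map_nil, List.sum_cons, List.sum_nil] at h2
  rw [count_scsRemove]
  omega

-- main induction: A's recursion against B's counter loop, from a related counter state
lemma scs_main (subsets : List (List Int)) : ∀ (X : List Int) (need : PySem.Dict Int Int) (count : Int),
    scsRel need X → Pre_set_cover_solver X subsets count →
    set_cover_solver X subsets count = count + scsLoop need (X.length : Int) 0 subsets := by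
  induction subsets using List.reverseRecOn with
  | nil =>
    intro X need count hrel hpre
    have hX : X = [] := by
      cases X with
      | nil => rfl
      | cons a t =>
        exfalso
        have := hpre a (List.mem_cons_self)
        simp [List.count_cons_self] at this
    subst hX
    rw [set_cover_solver, scsLoop]
    simp
  | append_singleton rest s ih =>
    intro X need count hrel hpre
    by_cases hX : X.length = 0
    · have hX' : X = [] := List.length_eq_zero_iff.mp hX
      subst hX'
      rw [set_cover_solver, scsLoop]
      simp
    · have hr0 : ((X.length : Int)) ≠ 0 := by exact_mod_cast hX
      rw [set_cover_solver, if_neg hX, PySem.List.pop?_last rest s]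
      show set_cover_solver (scsRemove s X) rest (count + 1) = _
      rw [scsLoop, if_neg hr0, PySem.List.pop?_last rest s]
      simp only
      obtain ⟨hrel', hlen'⟩ := scsDec_foldl_inv s X need hrel
      set st := s.foldl scsDec (need, (X.length : Int)) with hst
      rw [hlen', scsLoop_shift]
      have hpre' := pre_preserved X s rest count hpre (count + 1)
      rw [ih (scsRemove s X) st.1 (count + 1) hrel' hpre']
      ring

-- ===== VERDICT (by name: the statement is the Claim_ definition above) =====
theorem set_cover_solver_spec : Claim_equal_set_cover_solver := by
  intro X subsets count _ hpre
  unfold Spec_set_cover_solver set_cover_solver_alt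
  simp only
  rw [scs_main subsets X _ count (scsRel_counter X) hpre]
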